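-- pv_equiv track=rewrite | github.com/Endalebob/competitive-programing | 2486-append-characters-to-string-to-make-subsequence/2486-append-characters-to-string-to-make-subsequence.py | appendCharacters
-- ===== SOURCE A (Python) =====
-- def appendCharacters(s: str, t: str) -> int:
--     idx = 0
--     for i in range(len(t)):
--         temp = idx
--         for j in range(idx,len(s)):
--             if s[j] == t[i]:
--                 idx = j+1
--                 break
--         if idx == temp:
--             return len(t)-i
--     return 0
-- ===== SOURCE B (Python) =====
-- def appendCharacters(s: str, t: str) -> int:
--     j = 0
--     for c in s:
--         if j < len(t) and c == t[j]:
--             j += 1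
--     return len(t) - j
-- ===== Notes on version B (the rewrite author's own statement) =====
-- stated objective: simpler
-- what changed: Replaces A's nested structure (outer loop over t with an inner break-scan of s and an idx-unchanged early return) by a single flat pass over s that conditionally advances a pointer into t, returning len(t) minus the matched prefix length.
import Mathlib
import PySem

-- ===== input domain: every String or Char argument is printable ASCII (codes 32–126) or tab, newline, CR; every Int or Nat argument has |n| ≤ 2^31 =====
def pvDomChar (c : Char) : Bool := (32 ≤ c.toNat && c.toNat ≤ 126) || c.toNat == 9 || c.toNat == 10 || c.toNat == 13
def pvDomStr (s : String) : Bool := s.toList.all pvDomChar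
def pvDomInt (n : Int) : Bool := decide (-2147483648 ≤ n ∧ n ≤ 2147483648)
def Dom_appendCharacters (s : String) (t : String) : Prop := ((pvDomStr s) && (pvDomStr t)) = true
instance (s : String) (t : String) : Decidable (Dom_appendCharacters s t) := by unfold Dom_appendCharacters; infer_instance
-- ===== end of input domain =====

-- B replaces A's nested loop (outer over t, inner break-scan of s) by one flat pass over s
-- advancing a pointer into t; objective: simpler. Return values agree on all inputs.

-- ===== PORT A =====
-- inner loop 'for j in range(idx, len(s)): if s[j] == t[i]: idx = j+1; break':
-- returns the new idx (some (j+1)) on break, none if it runs out (idx unchanged, i.e. idx == temp).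
def appendCharactersInner (s : List Char) (c : Char) (idx : Nat) : Option Nat :=
  if h : idx < s.length then
    if s[idx] = c then some (idx + 1) else appendCharactersInner s c (idx + 1)
  else none
termination_by s.length - idx

-- outer loop 'for i in range(len(t))', carried as recursion over the remaining suffix of t;
-- rest.length = len(t) - i, so 'return len(t)-i' is 'rest.length'.
def appendCharactersOuter (s : List Char) (idx : Nat) : List Char → Int
  | [] => 0
  | c :: rest =>
    match appendCharactersInner s c idx with
    | some idx' => appendCharactersOuter s idx' rest
    | none => ((c :: rest).length : Int)

def appendCharacters (s : String) (t : String) : Int :=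
  appendCharactersOuter s.toList 0 t.toList

-- ===== PORT B =====
-- single pass over s: 'for c in s: if j < len(t) and c == t[j]: j += 1'
def appendCharactersAltLoop (t : List Char) : List Char → Nat → Nat
  | [], j => j
  | c :: s', j =>
    appendCharactersAltLoop t s'
      (if h : j < t.length then (if t[j] = c then j + 1 else j) else j)

def appendCharacters_alt (s : String) (t : String) : Int :=
  (t.toList.length : Int) - (appendCharactersAltLoop t.toList s.toList 0 : Int)

-- ===== PRECONDITION & SPEC =====
def Spec_appendCharacters (s : String) (t : String) (out : Int) : Prop := out = appendCharacters_alt s t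
instance (s : String) (t : String) (out : Int) : Decidable (Spec_appendCharacters s t out) := by unfold Spec_appendCharacters; infer_instance

-- ===== CLAIM (what is proved, stated in full; the proofs are below) =====
def Claim_equal_appendCharacters : Prop := ∀ (s : String) (t : String), Dom_appendCharacters s t → Spec_appendCharacters s t (appendCharacters s t)

-- ===== LEMMAS AND PROOFS =====

-- reference function: number of characters of t greedily matched as a subsequence of s
def pvGreedy : List Char → List Char → Nat
  | [], _ => 0
  | _ :: _, [] => 0
  | a :: s', c :: t' => if a = c then pvGreedy s' t' + 1 else pvGreedy s' (c :: t')

theorem pvGreedy_nil_right (s : List Char) : pvGreedy s [] = 0 := by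
  cases s <;> simp [pvGreedy]

theorem inner_greedy (s : List Char) (c : Char) (t' : List Char) (idx : Nat) :
    pvGreedy (s.drop idx) (c :: t') =
      (match appendCharactersInner s c idx with
       | some idx' => pvGreedy (s.drop idx') t' + 1
       | none => 0) := by
  fun_induction appendCharactersInner s c idx with
  | case1 idx h hm =>
    rw [List.drop_eq_getElem_cons h]
    simp [pvGreedy, hm]
  | case2 idx h hm ih =>
    rw [List.drop_eq_getElem_cons h]
    simp only [pvGreedy, hm, if_neg hm]
    exact ih
  | case3 idx h =>
    rw [List.drop_eq_nil_of_le (by omega)]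
    simp [pvGreedy]

theorem outer_greedy (s : List Char) (rest : List Char) (idx : Nat) :
    appendCharactersOuter s idx rest =
      (rest.length : Int) - (pvGreedy (s.drop idx) rest : Int) := by
  induction rest generalizing idx with
  | nil => simp [appendCharactersOuter, pvGreedy_nil_right]
  | cons c rest ih =>
    have h := inner_greedy s c rest idx
    cases hm : appendCharactersInner s c idx with
    | some idx' =>
      rw [hm] at h
      have h' : pvGreedy (s.drop idx) (c :: rest) = pvGreedy (s.drop idx') rest + 1 := by
        simpa using h
      simp only [appendCharactersOuter, hm, ih, h', List.length_cons]
      push_cast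
      omega
    | none =>
      rw [hm] at h
      have h' : pvGreedy (s.drop idx) (c :: rest) = 0 := by simpa using h
      simp [appendCharactersOuter, hm, h']

theorem altLoop_greedy (s t : List Char) (j : Nat) (hj : j ≤ t.length) :
    appendCharactersAltLoop t s j = j + pvGreedy s (t.drop j) := by
  induction s generalizing j with
  | nil => simp [appendCharactersAltLoop, pvGreedy]
  | cons c s' ih =>
    rw [appendCharactersAltLoop]
    by_cases h : j < t.length
    · rw [List.drop_eq_getElem_cons h, dif_pos h]
      by_cases hm : t[j] = c
      · rw [if_pos hm, hm]
        simp only [pvGreedy, if_true]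
        rw [ih (j + 1) h]
        omega
      · have hm' : c ≠ t[j] := fun e => hm e.symm
        rw [if_neg hm]
        simp only [pvGreedy, if_neg hm']
        rw [ih j hj, List.drop_eq_getElem_cons h]
    · rw [dif_neg h]
      rw [ih j hj]
      rw [List.drop_eq_nil_of_le (by omega), pvGreedy_nil_right, pvGreedy_nil_right]

-- ===== VERDICT (by name: the statement is the Claim_ definition above) =====
theorem appendCharacters_spec : Claim_equal_appendCharacters := by
  intro s t _
  unfold Spec_appendCharacters appendCharacters appendCharacters_alt
  rw [outer_greedy, altLoop_greedy s.toList t.toList 0 (Nat.zero_le _)]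
  simp
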